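-- pv_equiv track=rewrite | github.com/titimar16/IA-NINJA | utilsQuixo.py | generateWeightEnnemy
-- ===== SOURCE A (Python) =====
-- def generateWeightEnnemy(mylist):
--     #Calcul du nombre de rond aligné on possede
--     weight = 0
--
--     indexes = getEnemyCells(mylist)
--     ## Horizontalement
--     for t in range(5):
--         num = 0
--         for i in range((t * 5) ,(5 * t) + 5):
--             if i in indexes:
--                 num += 1
--         for i in range(num):
--             weight += (i + 1)**2
--
--         if num == 5:
--             return 1000000000
--
--     ## Verticalement
--     for t in range(5):
--         num = 0
--         for i in range(t,t+21,5):
--             if i in indexes: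
--                 num += 1
--         for i in range(num):
--             weight += (i + 1)**2
--
--         if num == 5:
--             return 1000000000
--
--     ## Diagonale 0,0 -> 4,4
--
--     num = 0
--     for i in range(5):
--         if convertMatrix(i,i) in indexes:
--             num += 1
--     for i in range(num):
--         weight += (i + 1)**2
--     if num == 5:
--         return 1000000000
--
--     ## Diagonale 4,0 -> 0,4
--
--     num = 0
--     for i in range(5):
--         if convertMatrix(4-i,i) in indexes:
--             num += 1
--     for i in range(num):
--         weight += (i + 1)**2
--     if num == 5:
--         return 1000000000
--     return weight
--
-- def getEnemyCells(listebtn):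
--     # return list of index Enemy Cells
--     mylist = []
--     for i in range(len(listebtn)):
--         if checkIfValueX(listebtn[i]) == True:
--             mylist.append(i)
--     return mylist
--
-- def convertMatrix(columns,rows):
--     return columns + rows * 5
--
-- def checkIfValueX(btn):
--     if btn == "casevide.png":
--         return True
--     return False
-- ===== SOURCE B (Python) =====
-- # Table-driven: the 12 board lines listed once, one counting pass per line,
-- # sum of squares replaced by the closed form n(n+1)(2n+1)//6.
--
-- LINES = [
--     [0, 1, 2, 3, 4], [5, 6, 7, 8, 9], [10, 11, 12, 13, 14],
--     [15, 16, 17, 18, 19], [20, 21, 22, 23, 24],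
--     [0, 5, 10, 15, 20], [1, 6, 11, 16, 21], [2, 7, 12, 17, 22],
--     [3, 8, 13, 18, 23], [4, 9, 14, 19, 24],
--     [0, 6, 12, 18, 24], [4, 8, 12, 16, 20],
-- ]
--
-- def generateWeightEnnemy(mylist):
--     enemy = {i for i, b in enumerate(mylist) if b == "casevide.png"}
--     total = 0
--     for line in LINES:
--         num = sum(1 for i in line if i in enemy)
--         if num == 5:
--             return 1000000000
--         total += num * (num + 1) * (2 * num + 1) // 6
--     return total
-- ===== Notes on version B (the rewrite author's own statement) =====
-- stated objective: simpler
-- what changed: Replaced A's four duplicated block passes (rows, columns, two diagonals, each with an inner sum-of-squares loop) by a single loop over an explicit table of the 12 board lines, with the per-line weight computed by the closed form n*(n+1)*(2*n+1)//6 instead of the inner loop.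
import Mathlib
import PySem

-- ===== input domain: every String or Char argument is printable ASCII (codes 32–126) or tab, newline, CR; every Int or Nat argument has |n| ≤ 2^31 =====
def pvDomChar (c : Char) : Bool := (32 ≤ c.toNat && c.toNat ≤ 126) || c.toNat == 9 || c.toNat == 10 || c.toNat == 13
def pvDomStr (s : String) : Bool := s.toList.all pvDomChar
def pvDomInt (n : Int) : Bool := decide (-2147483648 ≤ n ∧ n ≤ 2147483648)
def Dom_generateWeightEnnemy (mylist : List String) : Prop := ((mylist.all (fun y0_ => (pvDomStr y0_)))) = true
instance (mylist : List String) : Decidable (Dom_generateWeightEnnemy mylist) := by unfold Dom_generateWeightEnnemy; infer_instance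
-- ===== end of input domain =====

-- B replaces A's four duplicated block passes by one loop over an explicit table of
-- the 12 board lines and the inner sum-of-squares loop by the closed form n(n+1)(2n+1)//6 (objective: simpler).

-- ===== PORT A =====
def checkIfValueX (btn : String) : Bool :=
  if btn == "casevide.png" then true else false

-- for i in range(len(listebtn)): if checkIfValueX(listebtn[i]): mylist.append(i)
-- (pyGetD is exact here: i always in range)
def getEnemyCells (listebtn : List String) : List Int :=
  (PySem.List.pyRange 0 (listebtn.length : Int) 1).foldl
    (fun acc i => if checkIfValueX (PySem.List.pyGetD listebtn i "") then acc ++ [i] else acc) []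

def convertMatrix (columns rows : Int) : Int := columns + rows * 5

-- for i in range(num): weight += (i+1)**2
def pvAddSquares (weight num : Int) : Int :=
  (PySem.List.pyRange 0 num 1).foldl (fun w i => w + (i + 1) ^ 2) weight

-- one iteration of the horizontal block (Sum.inl = early return already taken)
def pvRowStep (indexes : List Int) (st : Int ⊕ Int) (t : Int) : Int ⊕ Int :=
  match st with
  | .inl r => .inl r
  | .inr weight =>
    let num := (PySem.List.pyRange (t * 5) (5 * t + 5) 1).foldl
      (fun n i => if indexes.contains i then n + 1 else n) (0 : Int)
    let weight := pvAddSquares weight num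
    if num == 5 then .inl 1000000000 else .inr weight

-- one iteration of the vertical block
def pvColStep (indexes : List Int) (st : Int ⊕ Int) (t : Int) : Int ⊕ Int :=
  match st with
  | .inl r => .inl r
  | .inr weight =>
    let num := (PySem.List.pyRange t (t + 21) 5).foldl
      (fun n i => if indexes.contains i then n + 1 else n) (0 : Int)
    let weight := pvAddSquares weight num
    if num == 5 then .inl 1000000000 else .inr weight

-- diagonal 0,0 -> 4,4 block
def pvDiag1 (indexes : List Int) (st : Int ⊕ Int) : Int ⊕ Int :=
  match st with
  | .inl r => .inl r
  | .inr weight =>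
    let num := (PySem.List.pyRange 0 5 1).foldl
      (fun n i => if indexes.contains (convertMatrix i i) then n + 1 else n) (0 : Int)
    let weight := pvAddSquares weight num
    if num == 5 then .inl 1000000000 else .inr weight

-- diagonal 4,0 -> 0,4 block
def pvDiag2 (indexes : List Int) (st : Int ⊕ Int) : Int ⊕ Int :=
  match st with
  | .inl r => .inl r
  | .inr weight =>
    let num := (PySem.List.pyRange 0 5 1).foldl
      (fun n i => if indexes.contains (convertMatrix (4 - i) i) then n + 1 else n) (0 : Int)
    let weight := pvAddSquares weight num
    if num == 5 then .inl 1000000000 else .inr weight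

def generateWeightEnnemy (mylist : List String) : Int :=
  let indexes := getEnemyCells mylist
  let st := (PySem.List.pyRange 0 5 1).foldl (pvRowStep indexes) (.inr 0)
  let st := (PySem.List.pyRange 0 5 1).foldl (pvColStep indexes) st
  let st := pvDiag1 indexes st
  let st := pvDiag2 indexes st
  match st with
  | .inl r => r
  | .inr weight => weight

-- ===== PORT B =====
def pvLines : List (List Int) :=
  [[0, 1, 2, 3, 4], [5, 6, 7, 8, 9], [10, 11, 12, 13, 14],
   [15, 16, 17, 18, 19], [20, 21, 22, 23, 24],
   [0, 5, 10, 15, 20], [1, 6, 11, 16, 21], [2, 7, 12, 17, 22],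
   [3, 8, 13, 18, 23], [4, 9, 14, 19, 24],
   [0, 6, 12, 18, 24], [4, 8, 12, 16, 20]]

-- enemy = {i for i, b in enumerate(mylist) if b == "casevide.png"}
def pvEnemySet (mylist : List String) : PySem.Set Int :=
  PySem.Set.ofList
    (((PySem.List.enumerate mylist 0).filter (fun p => p.2 == "casevide.png")).map (fun p => p.1))

def pvLineStep (enemy : List Int) (st : Int ⊕ Int) (line : List Int) : Int ⊕ Int :=
  match st with
  | .inl r => .inl r
  | .inr total =>
    let num : Int := ((line.filter (fun i => enemy.contains i)).length : Int)
    if num == 5 then .inl 1000000000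
    else .inr (total + PySem.Int.floordiv (num * (num + 1) * (2 * num + 1)) 6)

def generateWeightEnnemy_alt (mylist : List String) : Int :=
  let enemy := pvEnemySet mylist
  match pvLines.foldl (pvLineStep enemy) (.inr 0) with
  | .inl r => r
  | .inr total => total

-- ===== PRECONDITION & SPEC =====
def Spec_generateWeightEnnemy (mylist : List String) (out : Int) : Prop := out = generateWeightEnnemy_alt mylist
instance (mylist : List String) (out : Int) : Decidable (Spec_generateWeightEnnemy mylist out) := by unfold Spec_generateWeightEnnemy; infer_instance

-- ===== CLAIM (what is proved, stated in full; the proofs are below) =====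
def Claim_equal_generateWeightEnnemy : Prop := ∀ (mylist : List String), Dom_generateWeightEnnemy mylist → Spec_generateWeightEnnemy mylist (generateWeightEnnemy mylist)

-- ===== LEMMAS AND PROOFS =====

-- A's enemy-index list and B's enemy set have the same members
lemma mem_enemySet_iff (mylist : List String) (i : Int) :
    i ∈ pvEnemySet mylist ↔ i ∈ getEnemyCells mylist := by
  unfold pvEnemySet getEnemyCells
  rw [PySem.List.foldl_append_if_eq_filter]
  simp only [PySem.Set.mem_ofList, List.mem_map, List.mem_filter,
    PySem.List.mem_enumerate_iff, List.nil_append, PySem.List.mem_pyRange_one]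
  constructor
  · rintro ⟨p, ⟨⟨k, hk, rfl⟩, hx⟩, rfl⟩
    refine ⟨⟨by omega, by exact_mod_cast by omega⟩, ?_⟩
    simp only [zero_add] at hx ⊢
    rw [PySem.List.pyGetD_natCast]
    simp_all [checkIfValueX, List.getD]
  · rintro ⟨⟨h0, hl⟩, hx⟩
    refine ⟨(i, mylist[i.toNat]'(by omega)), ⟨⟨i.toNat, by omega, by simp [h0]⟩, ?_⟩, rfl⟩
    rw [PySem.List.pyGetD_eq_getElem mylist "" h0 hl] at hx
    simpa [checkIfValueX] using hx

lemma contains_enemy (mylist : List String) (i : Int) :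
    (getEnemyCells mylist).contains i = (pvEnemySet mylist).contains i := by
  rw [Bool.eq_iff_iff]
  simp [mem_enemySet_iff]

-- counting loop = filter length
lemma count_foldl (c : Int → Bool) (r : List Int) :
    r.foldl (fun n i => if c i then n + 1 else n) (0 : Int) = ((r.filter c).length : Int) := by
  rw [PySem.List.foldl_if_add_one]
  simp [List.countP_eq_length_filter]

-- sum of squares loop = closed form, for 0 ≤ n ≤ 5
lemma addSquares_closed (n : Int) (h0 : 0 ≤ n) (h5 : n ≤ 5) (w : Int) :
    pvAddSquares w n = w + PySem.Int.floordiv (n * (n + 1) * (2 * n + 1)) 6 := by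
  unfold pvAddSquares
  interval_cases n <;>
    norm_num [show PySem.List.pyRange (0:Int) 0 1 = [] from by decide,
      show PySem.List.pyRange (0:Int) 1 1 = [0] from by decide,
      show PySem.List.pyRange (0:Int) 2 1 = [0,1] from by decide,
      show PySem.List.pyRange (0:Int) 3 1 = [0,1,2] from by decide,
      show PySem.List.pyRange (0:Int) 4 1 = [0,1,2,3] from by decide,
      show PySem.List.pyRange (0:Int) 5 1 = [0,1,2,3,4] from by decide,
      List.foldl] <;>
    omega

-- generic per-line step equality: A's block body = B's table step
lemma step_eq (enemy : List Int) (c : Int → Bool) (r l : List Int)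
    (hcount : r.foldl (fun n i => if c i then n + 1 else n) (0 : Int)
      = ((l.filter (fun i => enemy.contains i)).length : Int))
    (hlen : l.length = 5) (st : Int ⊕ Int) :
    (match st with
     | .inl x => (Sum.inl x : Int ⊕ Int)
     | .inr weight =>
       let num := r.foldl (fun n i => if c i then n + 1 else n) (0 : Int)
       let weight := pvAddSquares weight num
       if num == 5 then .inl 1000000000 else .inr weight)
    = pvLineStep enemy st l := by
  cases st with
  | inl x => rfl
  | inr w =>
    simp only [pvLineStep, hcount]
    have hb : ((l.filter (fun i => enemy.contains i)).length : Int) ≤ 5 := by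
      have := List.length_filter_le (fun i => enemy.contains i) l
      omega
    rw [addSquares_closed _ (by positivity) hb]

theorem generateWeightEnnemy_spec_aux (mylist : List String) :
    generateWeightEnnemy mylist = generateWeightEnnemy_alt mylist := by
  unfold generateWeightEnnemy generateWeightEnnemy_alt
  set idx := getEnemyCells mylist with hidx
  set enemy := pvEnemySet mylist with henemy
  have hc : ∀ i, idx.contains i = enemy.contains i := fun i => contains_enemy mylist i
  have hfix : ∀ (l : List Int),
      l.foldl (fun n i => if idx.contains i then n + 1 else n) (0 : Int)
        = ((l.filter (fun i => enemy.contains i)).length : Int) := by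
    intro l
    rw [count_foldl]
    congr 1
    exact congrArg List.length (List.filter_congr (fun i _ => hc i))
  have hd1 : ∀ st, pvDiag1 idx st = pvLineStep enemy st [0, 6, 12, 18, 24] := by
    intro st
    refine step_eq enemy _ _ _ ?_ (by decide) st
    rw [show PySem.List.pyRange (0:Int) 5 1 = [0,1,2,3,4] from by decide]
    have e1 : List.foldl (fun n i => if idx.contains (convertMatrix i i) = true then n + 1 else n) (0:Int) [0,1,2,3,4]
        = List.foldl (fun n i => if idx.contains i = true then n + 1 else n) (0:Int) [0,6,12,18,24] := by
      simp only [List.foldl, convertMatrix]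
      norm_num
    rw [e1]
    exact hfix _
  have hd2 : ∀ st, pvDiag2 idx st = pvLineStep enemy st [4, 8, 12, 16, 20] := by
    intro st
    refine step_eq enemy _ _ _ ?_ (by decide) st
    rw [show PySem.List.pyRange (0:Int) 5 1 = [0,1,2,3,4] from by decide]
    have e2 : List.foldl (fun n i => if idx.contains (convertMatrix (4 - i) i) = true then n + 1 else n) (0:Int) [0,1,2,3,4]
        = List.foldl (fun n i => if idx.contains i = true then n + 1 else n) (0:Int) [4,8,12,16,20] := by
      simp only [List.foldl, convertMatrix]
      norm_num
    rw [e2]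
    exact hfix _
  have hrow : ∀ (t : Int) (l : List Int), PySem.List.pyRange (t * 5) (5 * t + 5) 1 = l →
      l.length = 5 → ∀ st, pvRowStep idx st t = pvLineStep enemy st l := by
    intro t l hl hl5 st
    refine step_eq enemy _ _ _ ?_ hl5 st
    rw [hl]; exact hfix _
  have hcol : ∀ (t : Int) (l : List Int), PySem.List.pyRange t (t + 21) 5 = l →
      l.length = 5 → ∀ st, pvColStep idx st t = pvLineStep enemy st l := by
    intro t l hl hl5 st
    refine step_eq enemy _ _ _ ?_ hl5 st
    rw [hl]; exact hfix _
  rw [show PySem.List.pyRange (0:Int) 5 1 = [0,1,2,3,4] from by decide]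
  simp only [pvLines, List.foldl_cons, List.foldl_nil]
  rw [hrow 0 [0,1,2,3,4] (by decide) (by decide),
      hrow 1 [5,6,7,8,9] (by decide) (by decide),
      hrow 2 [10,11,12,13,14] (by decide) (by decide),
      hrow 3 [15,16,17,18,19] (by decide) (by decide),
      hrow 4 [20,21,22,23,24] (by decide) (by decide),
      hcol 0 [0,5,10,15,20] (by decide) (by decide),
      hcol 1 [1,6,11,16,21] (by decide) (by decide),
      hcol 2 [2,7,12,17,22] (by decide) (by decide),
      hcol 3 [3,8,13,18,23] (by decide) (by decide),
      hcol 4 [4,9,14,19,24] (by decide) (by decide),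
      hd1, hd2]

-- ===== VERDICT (by name: the statement is the Claim_ definition above) =====
theorem generateWeightEnnemy_spec : Claim_equal_generateWeightEnnemy := by
  intro mylist _
  unfold Spec_generateWeightEnnemy
  exact generateWeightEnnemy_spec_aux mylist
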